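-- pv_equiv track=rewrite | github.com/fiachra718/sutta_nlp | back.ne/scripts/scratch/ne_tsv_search.py | spans_from_headline
-- ===== SOURCE A (Python) =====
-- def spans_from_headline(hl: str):
--     """Return list of (start,end) offsets in the ORIGINAL text given an
--     hl string that is the original text with << and >> inserted around hits."""
--     spans, i, pos, start = [], 0, 0, None
--     while i < len(hl):
--         if hl.startswith("<<", i):
--             start = pos; i += 2
--         elif hl.startswith(">>", i):
--             if start is not None:
--                 spans.append((start, pos))
--                 start = None
--             i += 2
--         else:
--             i += 1; pos += 1
--     return spans
-- ===== SOURCE B (Python) =====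
-- import re
--
-- def spans_from_headline(hl: str):
--     """Return list of (start,end) offsets in the ORIGINAL text given an
--     hl string that is the original text with << and >> inserted around hits."""
--     spans, start, consumed = [], None, 0
--     for m in re.finditer(r'<<|>>', hl):
--         pos = m.start() - consumed
--         if m.group() == '<<':
--             start = pos
--         elif start is not None:
--             spans.append((start, pos))
--             start = None
--         consumed += 2
--     return spans
-- ===== Notes on version B (the rewrite author's own statement) =====
-- stated objective: idiomatic
-- what changed: B replaces A's character-by-character index scan with re.finditer over the two marker tokens plus a fold that keeps a running count of consumed marker characters (pos = match.start() - consumed).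
import Mathlib
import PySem

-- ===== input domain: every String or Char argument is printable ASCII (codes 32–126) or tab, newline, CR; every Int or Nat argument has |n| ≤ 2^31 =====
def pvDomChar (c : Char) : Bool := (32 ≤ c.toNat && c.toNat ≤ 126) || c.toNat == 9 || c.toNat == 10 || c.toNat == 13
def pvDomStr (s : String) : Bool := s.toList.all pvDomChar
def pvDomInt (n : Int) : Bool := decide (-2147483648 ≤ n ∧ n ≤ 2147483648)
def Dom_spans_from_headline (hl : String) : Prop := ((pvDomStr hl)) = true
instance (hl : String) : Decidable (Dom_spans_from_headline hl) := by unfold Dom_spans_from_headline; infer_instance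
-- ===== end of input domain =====

-- B replaces A's character-by-character index scan by a tokenize-then-fold decomposition
-- (find the marker tokens first, then fold with a running consumed counter); objective: idiomatic.

-- ===== PORT A =====
-- A's while loop over index i; hl.startswith("<<", i) is 'c = '<' ∧ rest.head? = some '<''.
def spansA_go : List Char → Int → Option Int → List (Int × Int) → List (Int × Int)
  | [], _, _, spans => spans
  | c :: rest, pos, start, spans =>
    if c = '<' ∧ rest.head? = some '<' then
      spansA_go rest.tail pos (some pos) spans
    else if c = '>' ∧ rest.head? = some '>' then
      match start with
      | some s => spansA_go rest.tail pos none (spans ++ [(s, pos)])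
      | none => spansA_go rest.tail pos none spans
    else spansA_go rest (pos + 1) start spans
termination_by cs => cs.length
decreasing_by all_goals simp [List.length_tail]

def spans_from_headline (hl : String) : List (Int × Int) :=
  spansA_go hl.toList 0 none []

-- ===== PORT B =====
-- re.finditer(r'<<|>>', hl): the left-to-right non-overlapping scan for the two marker
-- tokens, produced as a list of (match start index, is-'<<') pairs.
def spansB_tokens : List Char → Int → List (Int × Bool)
  | [], _ => []
  | c :: rest, i =>
    if c = '<' ∧ rest.head? = some '<' then
      (i, true) :: spansB_tokens rest.tail (i + 2)
    else if c = '>' ∧ rest.head? = some '>' then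
      (i, false) :: spansB_tokens rest.tail (i + 2)
    else spansB_tokens rest (i + 1)
termination_by cs => cs.length
decreasing_by all_goals simp [List.length_tail]

-- the for-loop over the matches, state (consumed, start, spans)
def spansB_step (st : Int × Option Int × List (Int × Int)) (tok : Int × Bool) :
    Int × Option Int × List (Int × Int) :=
  let pos := tok.1 - st.1
  if tok.2 then (st.1 + 2, some pos, st.2.2)
  else match st.2.1 with
    | some s => (st.1 + 2, none, st.2.2 ++ [(s, pos)])
    | none => (st.1 + 2, none, st.2.2)

def spans_from_headline_alt (hl : String) : List (Int × Int) :=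
  ((spansB_tokens hl.toList 0).foldl spansB_step (0, none, [])).2.2

-- ===== PRECONDITION & SPEC =====
def Spec_spans_from_headline (hl : String) (out : List (Int × Int)) : Prop := out = spans_from_headline_alt hl
instance (hl : String) (out : List (Int × Int)) : Decidable (Spec_spans_from_headline hl out) := by unfold Spec_spans_from_headline; infer_instance

-- ===== CLAIM (what is proved, stated in full; the proofs are below) =====
def Claim_equal_spans_from_headline : Prop := ∀ (hl : String), Dom_spans_from_headline hl → Spec_spans_from_headline hl (spans_from_headline hl)

-- ===== LEMMAS AND PROOFS =====

-- one-step unfolding lemmas for the two scanners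
theorem goA_nil (pos : Int) (start : Option Int) (spans : List (Int × Int)) :
    spansA_go [] pos start spans = spans := by
  rw [spansA_go.eq_def]

theorem goA_cons (c : Char) (rest : List Char) (pos : Int) (start : Option Int)
    (spans : List (Int × Int)) :
    spansA_go (c :: rest) pos start spans =
      if c = '<' ∧ rest.head? = some '<' then
        spansA_go rest.tail pos (some pos) spans
      else if c = '>' ∧ rest.head? = some '>' then
        match start with
        | some s => spansA_go rest.tail pos none (spans ++ [(s, pos)])
        | none => spansA_go rest.tail pos none spans
      else spansA_go rest (pos + 1) start spans := by
  rw [spansA_go.eq_def]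

theorem tokB_nil (i : Int) : spansB_tokens [] i = [] := by
  rw [spansB_tokens.eq_def]

theorem tokB_cons (c : Char) (rest : List Char) (i : Int) :
    spansB_tokens (c :: rest) i =
      if c = '<' ∧ rest.head? = some '<' then
        (i, true) :: spansB_tokens rest.tail (i + 2)
      else if c = '>' ∧ rest.head? = some '>' then
        (i, false) :: spansB_tokens rest.tail (i + 2)
      else spansB_tokens rest (i + 1) := by
  rw [spansB_tokens.eq_def]

-- Invariant: with pos = i - consumed, A's scan equals B's fold over the remaining tokens.
theorem spansA_eq_fold (n : Nat) :
    ∀ (cs : List Char), cs.length = n →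
      ∀ (i consumed : Int) (start : Option Int) (spans : List (Int × Int)),
        spansA_go cs (i - consumed) start spans =
          ((spansB_tokens cs i).foldl spansB_step (consumed, start, spans)).2.2 := by
  induction n using Nat.strong_induction_on with
  | _ n ih =>
    intro cs hlen i consumed start spans
    cases cs with
    | nil => simp [goA_nil, tokB_nil]
    | cons c rest =>
      have h2 : ∀ j : Int, j + 2 - (consumed + 2) = j - consumed := by intro j; ring
      rw [goA_cons, tokB_cons]
      by_cases h1 : c = '<' ∧ rest.head? = some '<'
      · rcases rest with _ | ⟨c2, rest2⟩
        · simp at h1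
        · have hr : rest2.length < n := by simp at hlen; omega
          rw [if_pos h1, if_pos h1]
          simp only [List.tail_cons, List.foldl, spansB_step]
          simpa [h2] using ih rest2.length hr rest2 rfl (i + 2) (consumed + 2)
            (some (i - consumed)) spans
      · rw [if_neg h1, if_neg h1]
        by_cases h3 : c = '>' ∧ rest.head? = some '>'
        · rcases rest with _ | ⟨c2, rest2⟩
          · simp at h3
          · have hr : rest2.length < n := by simp at hlen; omega
            rw [if_pos h3, if_pos h3]
            simp only [List.tail_cons]
            cases start with
            | some s =>
              simp only [List.foldl, spansB_step]
              simpa [h2] using ih rest2.length hr rest2 rfl (i + 2) (consumed + 2)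
                none (spans ++ [(s, i - consumed)])
            | none =>
              simp only [List.foldl, spansB_step]
              simpa [h2] using ih rest2.length hr rest2 rfl (i + 2) (consumed + 2)
                none spans
        · rw [if_neg h3, if_neg h3]
          have hr : rest.length < n := by simp at hlen; omega
          have h4 : i - consumed + 1 = i + 1 - consumed := by ring
          rw [h4]
          exact ih rest.length hr rest rfl (i + 1) consumed start spans

-- ===== VERDICT (by name: the statement is the Claim_ definition above) =====
theorem spans_from_headline_spec : Claim_equal_spans_from_headline := by
  intro hl _
  unfold Spec_spans_from_headline spans_from_headline spans_from_headline_alt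
  simpa using spansA_eq_fold hl.toList.length hl.toList rfl 0 0 none []
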